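-- pv_equiv track=rewrite | github.com/Auggy212/Agentic-ABM | backend/agents/buyer_intel/committee_role_mapper.py | _seniority_rank
-- ===== SOURCE A (Python) =====
-- _SENIORITY_RANK: dict[str, int] = {
--     "c_suite":               5,
--     "owner":                 5,
--     "founder":               5,
--     "vp":                    4,
--     "vice president":        4,
--     "director":              3,
--     "senior director":       3,
--     "head":                  3,
--     "manager":               2,
--     "senior manager":        2,
--     "individual_contributor": 1,
--     "unknown":               0,
-- }
--
-- def _normalise(s: str) -> str:
--     return s.strip().lower()
--
-- def _seniority_rank(seniority_label: str, title: str) -> int: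
--     """
--     Resolve a numeric rank from Apollo's seniority string + the raw title.
--     Title is also checked so that titles like "CTO" are caught even when
--     Apollo's seniority field is blank.
--     """
--     label_n = _normalise(seniority_label)
--     for key, rank in _SENIORITY_RANK.items():
--         if key in label_n:
--             return rank
--     # Fallback: check the title itself for VP / Director / Manager tokens
--     title_n = _normalise(title)
--     if any(t in title_n for t in ("vp", "vice president")):
--         return 4
--     if any(t in title_n for t in ("director", "head of")):
--         return 3
--     if "manager" in title_n:
--         return 2
--     return 0
-- ===== SOURCE B (Python) =====
-- _RANK_TABLE = [
--     ("c_suite", 5),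
--     ("owner", 5),
--     ("founder", 5),
--     ("vp", 4),
--     ("vice president", 4),
--     ("director", 3),
--     ("senior director", 3),
--     ("head", 3),
--     ("manager", 2),
--     ("senior manager", 2),
--     ("individual_contributor", 1),
--     ("unknown", 0),
-- ]
--
-- _TITLE_TABLE = [
--     ("vp", 4),
--     ("vice president", 4),
--     ("director", 3),
--     ("head of", 3),
--     ("manager", 2),
-- ]
--
--
-- def _best(s, table):
--     ranks = [rank for key, rank in table if key in s]
--     return max(ranks) if ranks else None
--
--
-- def _seniority_rank(seniority_label: str, title: str) -> int:
--     r = _best(seniority_label.strip().lower(), _RANK_TABLE)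
--     if r is None:
--         r = _best(title.strip().lower(), _TITLE_TABLE)
--     return 0 if r is None else r
-- ===== Notes on version B (the rewrite author's own statement) =====
-- stated objective: alternative
-- what changed: Replaces first-match early return over the seniority dict and the if/elif fallback chain with one table-driven helper that collects the ranks of ALL matching keys and returns their maximum; equivalent because both tables' ranks are non-increasing in order.
import Mathlib
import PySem

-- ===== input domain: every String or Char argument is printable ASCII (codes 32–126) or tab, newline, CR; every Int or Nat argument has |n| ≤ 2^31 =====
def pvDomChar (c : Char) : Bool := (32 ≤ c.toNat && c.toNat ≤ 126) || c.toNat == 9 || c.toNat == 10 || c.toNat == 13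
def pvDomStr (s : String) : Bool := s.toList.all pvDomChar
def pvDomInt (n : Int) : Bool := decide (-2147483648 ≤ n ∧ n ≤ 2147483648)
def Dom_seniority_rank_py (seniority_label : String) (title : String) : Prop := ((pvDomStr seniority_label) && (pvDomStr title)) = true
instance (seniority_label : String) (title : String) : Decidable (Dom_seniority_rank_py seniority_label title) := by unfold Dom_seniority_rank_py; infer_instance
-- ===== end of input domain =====

-- B replaces A's first-match early return and if/elif fallback by collect-all-matching-ranks-then-max
-- over two tables (equivalent since ranks are non-increasing in table order); objective: alternative.

-- ===== PORT A =====
def pvSeniorityTable : List (String × Int) :=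
  [("c_suite", 5), ("owner", 5), ("founder", 5), ("vp", 4), ("vice president", 4),
   ("director", 3), ("senior director", 3), ("head", 3), ("manager", 2),
   ("senior manager", 2), ("individual_contributor", 1), ("unknown", 0)]

def pvNormaliseA (s : String) : String := PySem.Str.lower (PySem.Str.strip s)

-- the 'for key, rank in _SENIORITY_RANK.items(): if key in label_n: return rank' loop
def pvScanA : List (String × Int) → String → Option Int
  | [], _ => none
  | (k, r) :: t, s => if PySem.Str.isIn k s then some r else pvScanA t s

-- the three fallback title checks of A
def pvFallbackA (title_n : String) : Int :=
  if PySem.Str.isIn "vp" title_n || PySem.Str.isIn "vice president" title_n then 4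
    else if PySem.Str.isIn "director" title_n || PySem.Str.isIn "head of" title_n then 3
    else if PySem.Str.isIn "manager" title_n then 2
    else 0

def seniority_rank_py (seniority_label : String) (title : String) : Int :=
  match pvScanA pvSeniorityTable (pvNormaliseA seniority_label) with
  | some r => r
  | none =>
    pvFallbackA (pvNormaliseA title)


-- ===== PORT B =====
def pvRankTableB : List (String × Int) :=
  [("c_suite", 5), ("owner", 5), ("founder", 5), ("vp", 4), ("vice president", 4),
   ("director", 3), ("senior director", 3), ("head", 3), ("manager", 2),
   ("senior manager", 2), ("individual_contributor", 1), ("unknown", 0)]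

def pvTitleTableB : List (String × Int) :=
  [("vp", 4), ("vice president", 4), ("director", 3), ("head of", 3), ("manager", 2)]

-- ranks = [rank for key, rank in table if key in s]; max(ranks) if ranks else None
def pvBestB (s : String) (table : List (String × Int)) : Option Int :=
  PySem.List.max?
    (table.filterMap (fun kv => if PySem.Str.isIn kv.1 s then some kv.2 else none))
    (fun y => y)

def seniority_rank_py_alt (seniority_label : String) (title : String) : Int :=
  match pvBestB (PySem.Str.lower (PySem.Str.strip seniority_label)) pvRankTableB with
  | some r => r
  | none =>
    match pvBestB (PySem.Str.lower (PySem.Str.strip title)) pvTitleTableB with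
    | some r => r
    | none => 0

-- ===== PRECONDITION & SPEC =====
def Spec_seniority_rank_py (seniority_label : String) (title : String) (out : Int) : Prop := out = seniority_rank_py_alt seniority_label title
instance (seniority_label : String) (title : String) (out : Int) : Decidable (Spec_seniority_rank_py seniority_label title out) := by unfold Spec_seniority_rank_py; infer_instance

-- ===== CLAIM (what is proved, stated in full; the proofs are below) =====
def Claim_equal_seniority_rank_py : Prop := ∀ (seniority_label : String) (title : String), Dom_seniority_rank_py seniority_label title → Spec_seniority_rank_py seniority_label title (seniority_rank_py seniority_label title)

-- ===== LEMMAS AND PROOFS =====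

lemma pv_foldl_max_of_le (m : List Int) (r : Int) (h : ∀ y ∈ m, y ≤ r) :
    m.foldl max r = r := by
  induction m with
  | nil => rfl
  | cons x t ih =>
    simp only [List.foldl_cons]
    rw [max_eq_left (h x (by simp))]
    exact ih (fun y hy => h y (by simp [hy]))

-- first match over a rank-non-increasing table equals the max of all matches
lemma pv_scan_eq_best (tbl : List (String × Int)) (s : String)
    (h : tbl.Pairwise (fun a b => b.2 ≤ a.2)) : pvScanA tbl s = pvBestB s tbl := by
  induction tbl with
  | nil => rfl
  | cons kv t ih =>
    obtain ⟨k, r⟩ := kv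
    rcases List.pairwise_cons.mp h with ⟨hhead, htail⟩
    by_cases hin : PySem.Str.isIn k s = true
    · simp only [pvScanA, pvBestB, List.filterMap_cons, hin, if_pos]
      rw [PySem.List.max?_id_cons]
      congr 1
      refine (pv_foldl_max_of_le _ r ?_).symm
      intro y hy
      rcases List.mem_filterMap.mp hy with ⟨⟨k', r'⟩, hmem, heq⟩
      by_cases h' : PySem.Str.isIn k' s = true
      · rw [if_pos h'] at heq
        cases Option.some.inj heq
        exact hhead _ hmem
      · rw [if_neg h'] at heq
        cases heq
    · simp only [pvScanA, pvBestB, List.filterMap_cons, hin, if_neg, Bool.false_eq_true,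
        not_false_eq_true]
      simpa [pvBestB] using ih htail

-- A's fallback if/elif chain is the scan of pvTitleTableB
lemma pv_fallback_eq (tn : String) :
    pvFallbackA tn
    = (match pvBestB tn pvTitleTableB with | some r => r | none => 0) := by
  unfold pvFallbackA
  rw [← pv_scan_eq_best pvTitleTableB tn (by decide)]
  cases h1 : PySem.Str.isIn "vp" tn <;>
  cases h2 : PySem.Str.isIn "vice president" tn <;>
  cases h3 : PySem.Str.isIn "director" tn <;>
  cases h4 : PySem.Str.isIn "head of" tn <;>
  cases h5 : PySem.Str.isIn "manager" tn <;>
    (simp only [pvScanA, pvTitleTableB, h1, h2, h3, h4, h5]; simp)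

-- ===== VERDICT (by name: the statement is the Claim_ definition above) =====
theorem seniority_rank_py_spec : Claim_equal_seniority_rank_py := by
  intro l t _
  unfold Spec_seniority_rank_py seniority_rank_py seniority_rank_py_alt
  rw [pv_scan_eq_best pvSeniorityTable _ (by decide)]
  have htab : pvSeniorityTable = pvRankTableB := rfl
  have hnorm : ∀ s, pvNormaliseA s = PySem.Str.lower (PySem.Str.strip s) := fun _ => rfl
  rw [htab, hnorm, hnorm]
  cases hb : pvBestB (PySem.Str.lower (PySem.Str.strip l)) pvRankTableB with
  | some r => rfl
  | none => exact pv_fallback_eq (PySem.Str.lower (PySem.Str.strip t))
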